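-- pv_equiv track=rewrite | github.com/2000023946/momo | h4.py | highestSum
-- ===== SOURCE A (Python) =====
-- def highestSum(list):
--     max = 0
--     index = -1
--     for i, string in enumerate(list):
--         sum = 0
--         for c in string:
--             if c.isdigit():
--                 sum += int(c)
--         if sum > max:
--             max = sum
--             index = i
--     return index
-- ===== SOURCE B (Python) =====
-- def highestSum(list):
--     def dsum(s):
--         return sum(int(d) * s.count(d) for d in "123456789")
--     order = sorted(range(len(list)), key=lambda i: (-dsum(list[i]), i))
--     if order and dsum(list[order[0]]) > 0:
--         return order[0]
--     return -1
-- ===== Notes on version B (the rewrite author's own statement) =====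
-- stated objective: alternative
-- what changed: A's fused running-max scan is replaced by a sort-based selection: B sorts the index list by the tuple key (-digit-sum, index) and takes the head of the sorted order (returning -1 when it is empty or its digit sum is 0), with each digit sum computed by counting the occurrences of every digit character '1'..'9' rather than a conditional character scan.
import Mathlib
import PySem

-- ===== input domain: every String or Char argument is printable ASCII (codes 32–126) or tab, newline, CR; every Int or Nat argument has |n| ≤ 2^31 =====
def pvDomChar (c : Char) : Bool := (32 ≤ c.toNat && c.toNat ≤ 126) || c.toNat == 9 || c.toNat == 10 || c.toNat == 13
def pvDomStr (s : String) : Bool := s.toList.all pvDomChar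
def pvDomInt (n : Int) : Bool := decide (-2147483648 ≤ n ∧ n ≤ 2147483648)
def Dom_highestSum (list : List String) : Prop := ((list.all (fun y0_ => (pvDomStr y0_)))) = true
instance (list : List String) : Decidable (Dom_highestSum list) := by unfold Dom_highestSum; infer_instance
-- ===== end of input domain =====

-- B replaces A's fused running-max scan by a sort-based selection: sort the indices by the
-- key (-digit-sum, index), take the head (-1 when empty or its digit sum is 0), with digit
-- sums computed by counting each digit character's occurrences ('alternative', no speed claim).

-- ===== PORT A =====
-- digit sum of one string, A's inner loop: 'for c in string: if c.isdigit(): sum += int(c)';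
-- int(c) for a char passing isdigit is its digit value c.toNat - 48 (exact: isdigit is '0'..'9'
-- on the ASCII domain)
def dsA (s : String) : Int :=
  s.toList.foldl (fun sum c => if PySem.Chars.isdigit c then sum + ((c.toNat : Int) - 48) else sum) 0

def highestSum (list : List String) : Int :=
  ((PySem.List.enumerate list 0).foldl
    (fun (st : Int × Int) p =>
      let sum := dsA p.2
      if sum > st.1 then (sum, p.1) else st) (0, -1)).2

-- ===== PORT B =====
-- B's digit sum: sum(int(d) * s.count(d) for d in "123456789")
def dsB (s : String) : Int :=
  (("123456789".toList).map
    (fun d => ((d.toNat : Int) - 48) * ((PySem.Str.count s (String.singleton d) : Nat) : Int))).sum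

-- sorted(range(len(list)), key=lambda i: (-dsum(list[i]), i)); head if its digit sum > 0 else -1
def highestSum_alt (list : List String) : Int :=
  match PySem.List.sorted2 (PySem.List.pyRange 0 (PySem.List.len list) 1)
          (fun i => -(dsB (PySem.List.pyGetD list i ""))) (fun i => i) false with
  | [] => -1
  | i :: _ => if 0 < dsB (PySem.List.pyGetD list i "") then i else -1

-- ===== PRECONDITION & SPEC =====
def Spec_highestSum (list : List String) (out : Int) : Prop := out = highestSum_alt list
instance (list : List String) (out : Int) : Decidable (Spec_highestSum list out) := by unfold Spec_highestSum; infer_instance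

-- ===== CLAIM (what is proved, stated in full; the proofs are below) =====
def Claim_equal_highestSum : Prop := ∀ (list : List String), Dom_highestSum list → Spec_highestSum list (highestSum list)

-- ===== LEMMAS AND PROOFS =====

theorem char_eq_of_toNat (c d : Char) (h : c.toNat = d.toNat) : c = d :=
  Char.ext (UInt32.toNat_inj.mp h)

-- counting a single character as a substring is List.count (specific to B's 'go' on a 1-char needle)
theorem countgo_single (d : Char) (l : List Char) (fuel acc : Nat) (h : l.length ≤ fuel) :
    PySem.Chars.count.go [d] fuel l acc = acc + l.count d := by
  induction l generalizing fuel acc with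
  | nil => cases fuel <;> simp [PySem.Chars.count.go]
  | cons c t ih =>
    cases fuel with
    | zero => simp at h
    | succ f =>
      simp only [List.length_cons, Nat.add_le_add_iff_right] at h
      rw [PySem.Chars.count.go]
      by_cases hc : c = d
      · subst hc
        simp only [List.isPrefixOf, beq_self_eq_true, Bool.true_and,
          if_true, List.length_singleton, List.drop_one, List.tail_cons]
        rw [ih _ _ h, List.count_cons]
        simp; omega
      · have hp : ([d].isPrefixOf (c :: t)) = false := by
          simp [List.isPrefixOf]; exact fun he => hc he.symm
        rw [hp]
        simp only [Bool.false_eq_true, if_false]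
        rw [ih _ _ h, List.count_cons]
        simp [hc]

theorem count_single (d : Char) (cs : List Char) :
    PySem.Chars.count cs [d] = cs.count d := by
  rw [PySem.Chars.count]
  simp only [List.isEmpty_cons, Bool.false_eq_true, if_false]
  rw [countgo_single d cs cs.length 0 le_rfl, Nat.zero_add]

-- the contribution of one character c to B's nine per-digit counts
theorem extra_sum (c : Char) :
    (("123456789".toList).map
      (fun d => ((d.toNat : Int) - 48) * (if (c == d) = true then (1:Int) else 0))).sum
      = if PySem.Chars.isdigit c then ((c.toNat : Int) - 48) else 0 := by
  have hL : "123456789".toList = ['1','2','3','4','5','6','7','8','9'] := by decide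
  rw [hL]
  by_cases hd : PySem.Chars.isdigit c
  · have hb : 48 ≤ c.toNat ∧ c.toNat ≤ 57 := by
      unfold PySem.Chars.isdigit at hd
      rw [Bool.and_eq_true, decide_eq_true_eq, decide_eq_true_eq] at hd
      exact ⟨UInt32.le_iff_toNat_le.mp (Char.le_def.mp hd.1),
             UInt32.le_iff_toNat_le.mp (Char.le_def.mp hd.2)⟩
    obtain ⟨h1, h2⟩ := hb
    have h : c.toNat = 48 ∨ c.toNat = 49 ∨ c.toNat = 50 ∨ c.toNat = 51 ∨ c.toNat = 52 ∨
        c.toNat = 53 ∨ c.toNat = 54 ∨ c.toNat = 55 ∨ c.toNat = 56 ∨ c.toNat = 57 := by omega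
    rcases h with h|h|h|h|h|h|h|h|h|h <;>
      first
      | (have hc := char_eq_of_toNat c '0' (by rw [h]; decide); subst hc; decide)
      | (have hc := char_eq_of_toNat c '1' (by rw [h]; decide); subst hc; decide)
      | (have hc := char_eq_of_toNat c '2' (by rw [h]; decide); subst hc; decide)
      | (have hc := char_eq_of_toNat c '3' (by rw [h]; decide); subst hc; decide)
      | (have hc := char_eq_of_toNat c '4' (by rw [h]; decide); subst hc; decide)
      | (have hc := char_eq_of_toNat c '5' (by rw [h]; decide); subst hc; decide)
      | (have hc := char_eq_of_toNat c '6' (by rw [h]; decide); subst hc; decide)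
      | (have hc := char_eq_of_toNat c '7' (by rw [h]; decide); subst hc; decide)
      | (have hc := char_eq_of_toNat c '8' (by rw [h]; decide); subst hc; decide)
      | (have hc := char_eq_of_toNat c '9' (by rw [h]; decide); subst hc; decide)
  · have hne : ∀ d : Char, PySem.Chars.isdigit d = true → (c == d) = false := by
      intro d hdd
      rw [beq_eq_false_iff_ne]
      rintro rfl; exact hd hdd
    simp only [List.map_cons, List.map_nil, List.sum_cons, List.sum_nil]
    rw [hne '1' (by decide), hne '2' (by decide), hne '3' (by decide), hne '4' (by decide),
        hne '5' (by decide), hne '6' (by decide), hne '7' (by decide), hne '8' (by decide),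
        hne '9' (by decide)]
    simp [hd]

-- B's nine per-digit counts total the digit-value sum of the filtered characters
theorem sum_counts (cs : List Char) :
    (("123456789".toList).map (fun d => ((d.toNat : Int) - 48) * ((cs.count d : Nat) : Int))).sum
      = ((cs.filter PySem.Chars.isdigit).map (fun c => ((c.toNat : Int) - 48))).sum := by
  induction cs with
  | nil => simp
  | cons c cs ih =>
    have hstep : ∀ d : Char, (((c :: cs).count d : Nat) : Int)
        = ((cs.count d : Nat) : Int) + (if (c == d) = true then (1:Int) else 0) := by
      intro d
      rw [List.count_cons]
      split_ifs <;> push_cast <;> ring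
    calc (("123456789".toList).map (fun d => ((d.toNat : Int) - 48) * (((c :: cs).count d : Nat) : Int))).sum
        = (("123456789".toList).map (fun d => ((d.toNat : Int) - 48) * ((cs.count d : Nat) : Int)
            + ((d.toNat : Int) - 48) * (if (c == d) = true then (1:Int) else 0))).sum := by
          apply congrArg
          apply List.map_congr_left
          intro d _
          rw [hstep d]; ring
      _ = (("123456789".toList).map (fun d => ((d.toNat : Int) - 48) * ((cs.count d : Nat) : Int))).sum
            + (("123456789".toList).map (fun d => ((d.toNat : Int) - 48) * (if (c == d) = true then (1:Int) else 0))).sum := by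
          rw [PySem.List.sum_map_add_int]
      _ = ((cs.filter PySem.Chars.isdigit).map (fun c => ((c.toNat : Int) - 48))).sum
            + (if PySem.Chars.isdigit c then ((c.toNat : Int) - 48) else 0) := by
          rw [ih, extra_sum]
      _ = (((c :: cs).filter PySem.Chars.isdigit).map (fun c => ((c.toNat : Int) - 48))).sum := by
          by_cases hd : PySem.Chars.isdigit c <;> simp [hd]
          ring

-- A's inner fold with a general accumulator
theorem ds_eq_aux (cs : List Char) (a : Int) :
    cs.foldl (fun sum c => if PySem.Chars.isdigit c then sum + ((c.toNat : Int) - 48) else sum) a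
      = a + ((cs.filter PySem.Chars.isdigit).map (fun c => ((c.toNat : Int) - 48))).sum := by
  induction cs generalizing a with
  | nil => simp
  | cons c cs ih =>
    by_cases h : PySem.Chars.isdigit c
    · simp [h, ih]; ring
    · simp [h, ih]

theorem ds_eq (s : String) : dsB s = dsA s := by
  have h1 : ∀ d : Char, PySem.Str.count s (String.singleton d) = s.toList.count d := by
    intro d
    rw [PySem.Str.count_eq]
    have hs : (String.singleton d).toList = [d] := by simp
    rw [hs]
    exact count_single d s.toList
  unfold dsB dsA
  simp only [h1]
  rw [sum_counts, ds_eq_aux]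
  ring

-- characterisation of A's fused loop, generalised over start index and accumulator
theorem loopA (l : List String) (n m i : Int) :
    ((PySem.List.enumerate l n).foldl
      (fun (st : Int × Int) p =>
        let sum := dsA p.2
        if sum > st.1 then (sum, p.1) else st) (m, i)).2
    = (if (l.map dsA).foldl max m = m then i
       else n + (((PySem.List.index? (l.map dsA) ((l.map dsA).foldl max m)).getD 0 : Nat) : Int)) := by
  induction l generalizing n m i with
  | nil => simp [PySem.List.enumerate_nil]
  | cons s l ih =>
    rw [PySem.List.enumerate_cons]
    simp only [List.foldl_cons, List.map_cons]
    by_cases h : dsA s > m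
    · simp only [gt_iff_lt, h, if_true, ih]
      have hge : dsA s ≤ (l.map dsA).foldl max (dsA s) := (PySem.List.le_foldl_max _ _).1
      have hmax : max m (dsA s) = dsA s := max_eq_right h.le
      rw [hmax]
      have hne : (l.map dsA).foldl max (dsA s) ≠ m := fun hc => absurd (hc ▸ hge) (not_le.mpr h)
      rw [if_neg hne]
      by_cases hd : (l.map dsA).foldl max (dsA s) = dsA s
      · rw [if_pos hd, hd, PySem.List.index?_cons_self]
        simp
      · rw [if_neg hd]
        have hmem : (l.map dsA).foldl max (dsA s) ∈ l.map dsA := by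
          rcases PySem.List.foldl_max_mem (l.map dsA) (dsA s) with h1 | h1
          · exact absurd h1 hd
          · exact h1
        obtain ⟨k, hk⟩ := Option.isSome_iff_exists.mp
          ((PySem.List.index?_isSome_iff _ _).mpr hmem)
        have hxv : dsA s ≠ (l.map dsA).foldl max (dsA s) := fun hc => hd hc.symm
        rw [PySem.List.index?_cons_of_ne _ hxv, hk]
        simp only [Option.map_some, Option.getD_some]
        push_cast; ring
    · simp only [gt_iff_lt, h, if_false, ih]
      have hmax : max m (dsA s) = m := max_eq_left (not_lt.mp h)
      rw [hmax]
      by_cases hM : (l.map dsA).foldl max m = m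
      · simp [hM]
      · rw [if_neg hM, if_neg hM]
        have hgem : m ≤ (l.map dsA).foldl max m := (PySem.List.le_foldl_max _ _).1
        have hne : dsA s ≠ (l.map dsA).foldl max m := by
          intro hc
          have hd : dsA s ≤ m := not_lt.mp h
          omega
        have hmem : (l.map dsA).foldl max m ∈ l.map dsA := by
          rcases PySem.List.foldl_max_mem (l.map dsA) m with h1 | h1
          · exact absurd h1 hM
          · exact h1
        obtain ⟨k, hk⟩ := Option.isSome_iff_exists.mp
          ((PySem.List.index?_isSome_iff _ _).mpr hmem)
        rw [PySem.List.index?_cons_of_ne _ hne, hk]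
        simp only [Option.map_some, Option.getD_some]
        push_cast; ring

-- B's sorted2 with Int keys is sorted with the lexicographic key
theorem sorted2_eq_sorted_lex (xs : List Int) (k1 k2 : Int → Int) :
    PySem.List.sorted2 xs k1 k2 false
      = PySem.List.sorted xs (fun x => toLex (k1 x, k2 x)) false := by
  have hb : (fun (a b : Int) => decide (k1 a < k1 b) || (!decide (k1 b < k1 a) && decide (k2 a < k2 b)))
      = fun a b => decide ((toLex (k1 a, k2 a)) < toLex (k1 b, k2 b)) := by
    funext a b
    simp only [Prod.Lex.lt_iff]
    by_cases h1 : k1 a < k1 b <;> by_cases h2 : k1 b < k1 a <;> by_cases h3 : k2 a < k2 b <;>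
      simp [h1, h2, h3] <;> omega
  rw [PySem.List.sorted_eq_foldl_insertBy]
  show List.foldl (fun acc x => PySem.List.insertBy _ x acc) [] xs = _
  rw [hb]
  rfl

theorem highestSum_eq_alt (list : List String) : highestSum list = highestSum_alt list := by
  have hA := loopA list 0 0 (-1)
  unfold highestSum highestSum_alt
  rw [hA]
  set n : Int := PySem.List.len list with hn
  set idxs := PySem.List.pyRange 0 n 1 with hidxs
  set k : Int → Int := fun i => dsA (PySem.List.pyGetD list i "") with hk
  have hkey : ∀ i : Int, dsB (PySem.List.pyGetD list i "") = k i := by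
    intro i; rw [hk]; exact ds_eq _
  simp only [hkey]
  rw [sorted2_eq_sorted_lex]
  set sums := list.map dsA with hsums
  have hsums_eq : sums = idxs.map k := by
    calc sums = (idxs.map (fun j => PySem.List.pyGetD list j "")).map dsA := by
          rw [hsums]; congr 1
          rw [hidxs, hn]
          exact (PySem.List.map_pyGetD_pyRange_zero list "").symm
      _ = idxs.map k := by rw [List.map_map]; rfl
  set M : Int := sums.foldl max 0 with hM
  have hM0 : 0 ≤ M := (PySem.List.le_foldl_max sums 0).1
  have hub : ∀ v ∈ sums, v ≤ M := (PySem.List.le_foldl_max sums 0).2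
  cases horder : PySem.List.sorted idxs (fun i => toLex (-(k i), i)) false with
  | nil =>
    have hidnil : idxs = [] := (PySem.List.sorted_eq_nil_iff _ _ _).mp horder
    have hsnil : sums = [] := by rw [hsums_eq, hidnil]; rfl
    have : M = 0 := by rw [hM, hsnil]; rfl
    rw [if_pos this]
  | cons h t =>
    have hhmem : h ∈ idxs := by
      rw [← PySem.List.mem_sorted idxs (fun i => toLex (-(k i), i)) false h, horder]
      exact List.mem_cons_self
    have hhr : 0 ≤ h ∧ h < n := PySem.List.mem_pyRange_one.mp hhmem
    have hmin : ∀ y ∈ idxs, (toLex (-(k h), h)) ≤ toLex (-(k y), y) :=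
      PySem.List.key_head_sorted_le idxs _ horder
    have hge : ∀ y ∈ idxs, k y ≤ k h := by
      intro y hy
      rcases Prod.Lex.le_iff.mp (hmin y hy) with h1 | h1
      · simp only [ofLex_toLex] at h1; omega
      · simp only [ofLex_toLex] at h1; omega
    have hkh_mem : k h ∈ sums := by rw [hsums_eq]; exact List.mem_map_of_mem hhmem
    have hkh_le : k h ≤ M := hub _ hkh_mem
    have hub' : ∀ v ∈ sums, v ≤ k h := by
      intro v hv
      rw [hsums_eq] at hv
      obtain ⟨i, hi, rfl⟩ := List.mem_map.mp hv
      exact hge i hi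
    by_cases hMz : M = 0
    · rw [if_pos hMz]
      show -1 = if 0 < k h then h else -1
      have : ¬ (0 < k h) := by omega
      rw [if_neg this]
    · rw [if_neg hMz]
      show _ = if 0 < k h then h else -1
      have hMpos : 0 < M := lt_of_le_of_ne hM0 (Ne.symm hMz)
      have hMmem : M ∈ sums := by
        rcases PySem.List.foldl_max_mem sums 0 with h1 | h1
        · exact absurd (hM.trans h1) hMz
        · rw [hM]; exact h1
      have hkhM : k h = M := le_antisymm hkh_le (hub' M hMmem)
      obtain ⟨p, hp⟩ := Option.isSome_iff_exists.mp ((PySem.List.index?_isSome_iff _ _).mpr hMmem)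
      rw [hp]
      simp only [Option.getD_some]
      obtain ⟨hplt, hpv, hpmin⟩ := PySem.List.getElem_of_index?_eq_some hp
      have hlen : sums.length = (n - 0).toNat := by
        rw [hsums_eq, List.length_map, hidxs, PySem.List.length_pyRange_one]
      have hself : ∀ (q : Nat) (hq : q < sums.length), sums[q] = k ((q : Int)) := by
        intro q hq
        rw [List.getElem_of_eq hsums_eq hq, List.getElem_map]
        congr 1
        rw [List.getElem_of_eq hidxs _, PySem.List.getElem_pyRange_one]
        omega
      have hp_range : ((p : Int)) ∈ idxs := by
        rw [hidxs]
        exact PySem.List.mem_pyRange_one.mpr (by constructor <;> omega)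
      have hple : h ≤ (p : Int) := by
        have := hmin _ hp_range
        have hkp : k ((p : Int)) = M := by rw [← hself p hplt]; exact hpv
        rcases Prod.Lex.le_iff.mp this with h1 | h1 <;> simp only [ofLex_toLex] at h1 <;> omega
      have hpleh : p ≤ h.toNat := by
        by_contra hcon
        push Not at hcon
        have hlt : h.toNat < sums.length := by omega
        have : sums[h.toNat] = M := by
          rw [hself h.toNat hlt]
          rw [show ((h.toNat : Nat) : Int) = h by omega]
          exact hkhM
        exact hpmin h.toNat (by omega) this
      have hhp : h = (p : Int) := by omega
      rw [if_pos (by omega), hhp]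
      omega

-- ===== VERDICT (by name: the statement is the Claim_ definition above) =====
theorem highestSum_spec : Claim_equal_highestSum := by
  intro list _
  unfold Spec_highestSum
  exact highestSum_eq_alt list
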